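-- pv_equiv track=rewrite | github.com/quasipedia/Chasy | src/logic.py | _get_multiple_words
-- ===== SOURCE A (Python) =====
-- def _get_multiple_words(sequence):
--     '''
--     Return a set of words that occurs multiple times in the sequence.
--     '''
--     seen = set()
--     multis = set()
--     for word in sequence:
--         if word in seen:
--             multis.add(word)
--         else:
--             seen.add(word)
--     return multis
-- ===== SOURCE B (Python) =====
-- def _get_multiple_words(sequence):
--     '''
--     Return a set of words that occurs multiple times in the sequence.
--     '''
--     first = {}
--     for i, word in reversed(list(enumerate(sequence))):
--         first[word] = i
--     return {word for i, word in enumerate(sequence) if first[word] != i}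
-- ===== Notes on version B (the rewrite author's own statement) =====
-- stated objective: alternative
-- what changed: Replaces the online seen/multis two-set detection by two staged passes: a backward pass building a dict of each word's first index, then a set comprehension keeping every word whose position is not its first index.
import Mathlib
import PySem

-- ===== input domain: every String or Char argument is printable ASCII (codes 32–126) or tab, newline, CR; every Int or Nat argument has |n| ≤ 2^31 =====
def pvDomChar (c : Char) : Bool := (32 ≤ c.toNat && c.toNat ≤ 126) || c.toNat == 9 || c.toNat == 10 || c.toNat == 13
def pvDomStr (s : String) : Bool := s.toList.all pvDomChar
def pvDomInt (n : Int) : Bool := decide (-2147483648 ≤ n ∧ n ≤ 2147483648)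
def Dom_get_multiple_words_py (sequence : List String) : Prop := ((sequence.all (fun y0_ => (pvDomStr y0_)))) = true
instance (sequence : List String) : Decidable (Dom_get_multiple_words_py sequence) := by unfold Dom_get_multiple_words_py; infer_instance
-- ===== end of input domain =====

-- B replaces A's online seen/multis two-set loop by two staged passes: a backward pass
-- building a dict of first-occurrence indices, then a set comprehension keeping the
-- words not at their first index (objective: alternative, same cost).

-- ===== PORT A =====
def get_multiple_words_py (sequence : List String) : List String :=
  (sequence.foldl
    (fun (st : List String × List String) word =>
      if PySem.Set.contains st.1 word then (st.1, PySem.Set.add st.2 word)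
      else (PySem.Set.add st.1 word, st.2))
    (PySem.Set.empty, PySem.Set.empty)).2

-- ===== PORT B =====
-- Python's `first[word]` would raise KeyError only for a word absent from `first`;
-- here every word of `sequence` is a key, so comparing with `Dict.get?` is exact.
def get_multiple_words_py_alt (sequence : List String) : List String :=
  let first : PySem.Dict String Int :=
    ((PySem.List.enumerate sequence 0).reverse).foldl
      (fun d p => PySem.Dict.insert d p.2 p.1) PySem.Dict.empty
  PySem.Set.ofList
    (((PySem.List.enumerate sequence 0).filter
        (fun p => decide (PySem.Dict.get? first p.2 ≠ some p.1))).map Prod.snd)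

-- ===== PRECONDITION & SPEC =====
def Spec_get_multiple_words_py (sequence : List String) (out : List String) : Prop := out = get_multiple_words_py_alt sequence
instance (sequence : List String) (out : List String) : Decidable (Spec_get_multiple_words_py sequence out) := by unfold Spec_get_multiple_words_py; infer_instance

-- ===== CLAIM (what is proved, stated in full; the proofs are below) =====
def Claim_equal_get_multiple_words_py : Prop := ∀ (sequence : List String), Dom_get_multiple_words_py sequence → Spec_get_multiple_words_py sequence (get_multiple_words_py sequence)

-- ===== LEMMAS AND PROOFS =====

/-- The duplicated occurrences of `rest`, relative to an already-seen prefix `pre`,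
in order of occurrence (second and later occurrences included, with repetition). -/
def pvDups (pre rest : List String) : List String :=
  match rest with
  | [] => []
  | w :: rs => (if w ∈ pre then [w] else []) ++ pvDups (pre ++ [w]) rs

lemma pvContains_add_eq (seen : List String) (w w' : String) :
    PySem.Set.contains (PySem.Set.add seen w) w' = decide (w' ∈ seen ∨ w' = w) := by
  by_cases hm : w' ∈ PySem.Set.add seen w
  · rw [(PySem.Set.contains_iff _ _).mpr hm]
    simp [(PySem.Set.mem_add _ _ _).mp hm]
  · have hfalse : PySem.Set.contains (PySem.Set.add seen w) w' = false :=
      Bool.eq_false_iff.mpr (fun hc => hm ((PySem.Set.contains_iff _ _).mp hc))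
    rw [hfalse]
    have := fun h => hm ((PySem.Set.mem_add _ _ _).mpr h)
    simp at this ⊢
    tauto

lemma pvMem_of_contains (seen pre : List String)
    (hinv : ∀ w, PySem.Set.contains seen w = decide (w ∈ pre)) (w' : String) :
    w' ∈ seen ↔ w' ∈ pre := by
  rw [← PySem.Set.contains_iff, hinv w', decide_eq_true_iff]

lemma pvA_eq_dups : ∀ (rest seen multis pre : List String),
    (∀ w, PySem.Set.contains seen w = decide (w ∈ pre)) →
    (rest.foldl
      (fun (st : List String × List String) word =>
        if PySem.Set.contains st.1 word then (st.1, PySem.Set.add st.2 word)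
        else (PySem.Set.add st.1 word, st.2))
      (seen, multis)).2 = PySem.Set.update multis (pvDups pre rest) := by
  intro rest
  induction rest with
  | nil => intro seen multis pre _; simp [pvDups, PySem.Set.update]
  | cons w rs ih =>
    intro seen multis pre hinv
    simp only [List.foldl_cons, hinv w]
    by_cases hw : w ∈ pre
    · rw [if_pos (by simp [hw])]
      rw [ih seen (PySem.Set.add multis w) (pre ++ [w])
        (by
          intro w'
          rw [hinv w']
          by_cases h : w' = w
          · subst h; simp [hw]
          · simp [List.mem_append, h])]
      simp [pvDups, hw, PySem.Set.update]
    · rw [if_neg (by simp [hw])]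
      rw [ih (PySem.Set.add seen w) multis (pre ++ [w])
        (by
          intro w'
          rw [pvContains_add_eq]
          have h1 := pvMem_of_contains seen pre hinv w'
          simp [List.mem_append, h1])]
      simp [pvDups, hw]

/-- The backward insertion loop computes, per key, the FIRST pair of the list. -/
lemma pvDict_first : ∀ (l : List (Int × String)) (w : String),
    PySem.Dict.get?
      (l.reverse.foldl (fun d p => PySem.Dict.insert d p.2 p.1) PySem.Dict.empty) w
      = (l.find? (fun p => p.2 == w)).map Prod.fst := by
  intro l
  induction l with
  | nil => intro w; simp [PySem.Dict.get?, PySem.Dict.empty]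
  | cons p tl ih =>
    intro w
    rw [List.reverse_cons, List.foldl_append]
    simp only [List.foldl_cons, List.foldl_nil, List.find?_cons]
    rw [PySem.Dict.get?_insert]
    by_cases h : p.2 = w
    · simp [h]
    · have hb : (p.2 == w) = false := by simp [h]
      rw [if_neg (Ne.symm h), ih w]
      simp [hb]

/-- In `pre ++ w :: rs`, the first index of `w` differs from `pre.length`
iff `w` already occurs in `pre`. -/
lemma pvFirst_ne_iff (pre : List String) (w : String) (rs : List String) :
    ((((PySem.List.enumerate (pre ++ w :: rs) 0).find? (fun p => p.2 == w)).map Prod.fst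
        ≠ some ((pre.length : Nat) : Int))) ↔ w ∈ pre := by
  rw [PySem.List.enumerate_append, List.find?_append]
  by_cases hw : w ∈ pre
  · obtain ⟨k, hk, hkw⟩ := List.mem_iff_getElem.mp hw
    have hsome : ((PySem.List.enumerate pre 0).find? (fun p => p.2 == w)).isSome := by
      rw [List.find?_isSome]
      refine ⟨((k : Int), pre[k]), ?_, by simp [hkw]⟩
      rw [PySem.List.mem_enumerate_iff]
      exact ⟨k, hk, by simp⟩
    obtain ⟨q, hq⟩ := Option.isSome_iff_exists.mp hsome
    have hqmem := List.mem_of_find?_eq_some hq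
    rw [PySem.List.mem_enumerate_iff] at hqmem
    obtain ⟨j, hj, hqe⟩ := hqmem
    rw [hq]
    simp only [Option.some_or, Option.map_some, ne_eq]
    constructor
    · intro _; exact hw
    · intro _ hcon
      rw [hqe] at hcon
      simp at hcon
      omega
  · have hnone : (PySem.List.enumerate pre 0).find? (fun p => p.2 == w) = none := by
      rw [List.find?_eq_none]
      intro q hq hqw
      rw [PySem.List.mem_enumerate_iff] at hq
      obtain ⟨j, hj, hqe⟩ := hq
      apply hw
      have hq2 : q.2 = w := by simpa using hqw
      rw [hqe] at hq2
      simp at hq2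
      rw [← hq2]
      exact List.getElem_mem hj
    rw [hnone]
    rw [PySem.List.enumerate_cons, List.find?_cons]
    simp [hw]

/-- The filtering pass of B produces exactly the duplicated occurrences. -/
lemma pvB_filter_eq_dups : ∀ (rest pre : List String),
    (((PySem.List.enumerate rest ((pre.length : Nat) : Int)).filter
        (fun p => decide (PySem.Dict.get?
          (((PySem.List.enumerate (pre ++ rest) 0).reverse).foldl
            (fun d q => PySem.Dict.insert d q.2 q.1) PySem.Dict.empty) p.2 ≠ some p.1))).map
      Prod.snd) = pvDups pre rest := by
  intro rest
  induction rest with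
  | nil => intro pre; simp [pvDups, PySem.List.enumerate_nil]
  | cons w rs ih =>
    intro pre
    rw [PySem.List.enumerate_cons, List.filter_cons]
    have hcond : (decide (PySem.Dict.get?
          (((PySem.List.enumerate (pre ++ w :: rs) 0).reverse).foldl
            (fun d q => PySem.Dict.insert d q.2 q.1) PySem.Dict.empty) w
          ≠ some ((pre.length : Nat) : Int))) = decide (w ∈ pre) := by
      rw [pvDict_first]
      by_cases hw : w ∈ pre
      · simp [hw, (pvFirst_ne_iff pre w rs).mpr hw]
      · have := (pvFirst_ne_iff pre w rs).not.mpr hw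
        simp only [not_not] at this
        simp [hw, this]
    have hrec := ih (pre ++ [w])
    rw [show (pre ++ [w]) ++ rs = pre ++ w :: rs by simp] at hrec
    rw [show ((((pre ++ [w]).length : Nat) : Int)) = ((pre.length : Nat) : Int) + 1 by
      simp] at hrec
    simp only [hcond, pvDups]
    by_cases hw : w ∈ pre
    · simp only [hw, decide_true, if_true, List.map_cons,
        List.singleton_append, List.cons.injEq]
      exact ⟨trivial, by simpa using hrec⟩
    · simp only [hw, decide_false, if_false, List.nil_append]
      simpa using hrec

-- ===== VERDICT (by name: the statement is the Claim_ definition above) =====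
theorem get_multiple_words_py_spec : Claim_equal_get_multiple_words_py := by
  intro sequence _
  unfold Spec_get_multiple_words_py get_multiple_words_py get_multiple_words_py_alt
  rw [pvA_eq_dups sequence PySem.Set.empty PySem.Set.empty []
    (by intro w; simp [PySem.Set.empty, PySem.Set.contains])]
  have hB := pvB_filter_eq_dups sequence []
  simp only [List.nil_append, List.length_nil, Nat.cast_zero] at hB
  rw [show PySem.Set.update PySem.Set.empty (pvDups [] sequence)
        = PySem.Set.ofList (pvDups [] sequence) from PySem.Set.update_nil_left _]
  exact (congrArg PySem.Set.ofList hB).symm
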